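-- pv_equiv track=rewrite | github.com/jina-ai/jina | jina/serve/runtimes/helper.py | _parse_specific_params
-- ===== SOURCE A (Python) =====
-- import copy
-- from typing import Any, Dict, List, Optional, Tuple, Union
--
-- _SPECIFIC_EXECUTOR_SEPARATOR = '__'
--
-- def _spit_key_and_executor_name(key_name: str) -> Tuple[str]:
--     """Split a specific key into a key, name pair
--
--     ex: 'key__my_executor' will be split into 'key', 'my_executor'
--
--     :param key_name: key name of the param
--     :return: return the split 'key', 'executor_name' for the key_name
--     """
--     key_split = key_name.split(_SPECIFIC_EXECUTOR_SEPARATOR)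
--
--     new_key_name = key_split.pop(-1)
--     executor_name = ''.join(key_split)
--
--     return new_key_name, executor_name
--
-- def _is_param_for_specific_executor(key_name: str) -> bool:
--     """Tell if a key is for a specific Executor
--
--     ex: 'key' is for every Executor whereas 'my_executor__key' is only for 'my_executor'
--
--     :param key_name: key name of the param
--     :return: return True if key_name is for specific Executor, False otherwise
--     """
--     if _SPECIFIC_EXECUTOR_SEPARATOR in key_name:
--         if key_name.startswith(_SPECIFIC_EXECUTOR_SEPARATOR) or key_name.endswith(
--             _SPECIFIC_EXECUTOR_SEPARATOR
--         ):
--             return False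
--         return True
--     else:
--         return False
--
-- def _parse_specific_params(parameters: Dict, executor_name: str):
--     """Parse the parameters dictionary to filter executor specific parameters
--
--     :param parameters: dictionary container the parameters
--     :param executor_name: name of the Executor
--     :returns: the parsed parameters after applying filtering for the specific Executor
--     """
--     parsed_params = copy.deepcopy(parameters)
--
--     for key in parameters:
--         if _is_param_for_specific_executor(key):
--             (
--                 key_name,
--                 key_executor_name,
--             ) = _spit_key_and_executor_name(key)
--
--             if key_executor_name == executor_name:
--                 parsed_params[key_name] = parameters[key]
--
--             del parsed_params[key]
--
--     specific_parameters = parameters.get(executor_name, None)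
--     if specific_parameters:
--         parsed_params.update(**specific_parameters)
--
--     return parsed_params
-- ===== SOURCE B (Python) =====
-- import copy
--
-- _SPECIFIC_EXECUTOR_SEPARATOR = '__'
--
--
-- def _is_specific(key: str) -> bool:
--     return (
--         _SPECIFIC_EXECUTOR_SEPARATOR in key
--         and not key.startswith(_SPECIFIC_EXECUTOR_SEPARATOR)
--         and not key.endswith(_SPECIFIC_EXECUTOR_SEPARATOR)
--     )
--
--
-- def _parse_specific_params(parameters, executor_name: str):
--     # Declarative construction: one comprehension for the common (non-specific)
--     # entries, one last-wins override index for the specific entries addressed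
--     # to executor_name, combined by a single dict merge (collisions keep the
--     # common entry's position but take the override's uncopied value; fresh
--     # override names are appended in first-match order).
--     common = {
--         key: copy.deepcopy(value)
--         for key, value in parameters.items()
--         if not _is_specific(key)
--     }
--     overrides = dict(
--         (key.split(_SPECIFIC_EXECUTOR_SEPARATOR)[-1], value)
--         for key, value in parameters.items()
--         if _is_specific(key)
--         and ''.join(key.split(_SPECIFIC_EXECUTOR_SEPARATOR)[:-1]) == executor_name
--     )
--     result = {**common, **overrides}
--     specific = parameters.get(executor_name, None)
--     if specific:
--         result.update(**specific)
--     return result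
-- ===== Notes on version B (the rewrite author's own statement) =====
-- stated objective: alternative
-- what changed: B discards A's deepcopy-whole-dict-then-delete-and-reinsert mutation loop and instead constructs the result declaratively: a comprehension for the common entries, a separately built last-wins override index for the specific entries addressed to executor_name, combined by a single {**common, **overrides} dict merge.
-- outside the precondition, e.g. on _parse_specific_params({'e': {'p': 1}}, 'e'): A returns {'e': {'p': 1}, 'p': 1}, B returns {'e': {'p': 1}, 'p': 1}
import Mathlib
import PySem

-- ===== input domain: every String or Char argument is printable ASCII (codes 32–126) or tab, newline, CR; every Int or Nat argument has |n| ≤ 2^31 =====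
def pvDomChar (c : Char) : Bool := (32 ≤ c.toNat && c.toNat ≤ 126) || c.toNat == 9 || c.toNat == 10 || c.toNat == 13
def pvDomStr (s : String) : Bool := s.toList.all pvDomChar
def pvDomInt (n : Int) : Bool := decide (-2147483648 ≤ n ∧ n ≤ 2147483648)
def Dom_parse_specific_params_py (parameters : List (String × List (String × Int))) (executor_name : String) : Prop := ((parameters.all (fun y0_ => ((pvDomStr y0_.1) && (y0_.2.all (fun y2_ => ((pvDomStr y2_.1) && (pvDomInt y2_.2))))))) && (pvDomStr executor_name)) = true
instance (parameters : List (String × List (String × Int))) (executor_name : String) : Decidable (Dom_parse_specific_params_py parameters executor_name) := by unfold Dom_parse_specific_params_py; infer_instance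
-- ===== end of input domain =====

-- B replaces A's deepcopy-then-delete mutation loop by a declarative construction: a comprehension
-- for the common entries, a last-wins override index, and one dict merge; objective: alternative.

-- ===== PORT A =====

-- _is_param_for_specific_executor
def pvIsSpecificA (key : String) : Bool :=
  if PySem.Str.isIn "__" key then
    if PySem.Str.startswith key "__" || PySem.Str.endswith key "__" then false
    else true
  else false

-- _spit_key_and_executor_name
def pvSplitKeyAndExecutorName (key : String) : String × String :=
  let key_split := PySem.Chars.splitOn key.toList "__".toList
  -- key_split.pop(-1): str.split never returns an empty list, so pop(-1) is its last element
  let new_key_name := key_split.getLastD []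
  let executor_name := PySem.Chars.join [] key_split.dropLast  -- ''.join(key_split) after the pop
  (String.ofList new_key_name, String.ofList executor_name)

def parse_specific_params_py (parameters : List (String × List (String × Int))) (executor_name : String) : List (String × List (String × Int)) :=
  let d : PySem.Dict String (List (String × Int)) := PySem.Dict.ofList parameters
  let parsed := d  -- parsed_params = copy.deepcopy(parameters)
  let parsed := d.keys.foldl (fun parsed key =>  -- for key in parameters:
    if pvIsSpecificA key then
      let kn_ke := pvSplitKeyAndExecutorName key
      -- parameters[key]: key is a key of the dict, so the [] default is never used
      let parsed := if kn_ke.2 = executor_name then parsed.insert kn_ke.1 (d.getD key []) else parsed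
      parsed.erase key  -- del parsed_params[key]
    else parsed) parsed
  -- specific_parameters = parameters.get(executor_name, None); 'if specific_parameters:' is true only
  -- for a non-empty entry, where update(**specific_parameters) would store Int values — outside the
  -- declared value type. Pre_ excludes exactly that case, so the true branch is a stub here.
  match d.get? executor_name with
  | none => parsed.items
  | some sp => if sp.isEmpty then parsed.items else parsed.items

-- ===== PORT B =====

-- _is_specific of Source B
def pvIsSpecificB (key : String) : Bool :=
  PySem.Str.isIn "__" key && !PySem.Str.startswith key "__" && !PySem.Str.endswith key "__"

def parse_specific_params_py_alt (parameters : List (String × List (String × Int))) (executor_name : String) : List (String × List (String × Int)) :=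
  let d : PySem.Dict String (List (String × Int)) := PySem.Dict.ofList parameters
  -- common = {key: deepcopy(value) for key, value in parameters.items() if not _is_specific(key)}
  let common : PySem.Dict String (List (String × Int)) :=
    PySem.Dict.ofList (d.items.filter (fun kv => !pvIsSpecificB kv.1))
  -- overrides = dict((key.split('__')[-1], value) for key, value in parameters.items()
  --                  if _is_specific(key) and ''.join(key.split('__')[:-1]) == executor_name)
  let overrides : PySem.Dict String (List (String × Int)) :=
    PySem.Dict.ofList
      ((d.items.filter (fun kv => pvIsSpecificB kv.1 &&
          (String.ofList (PySem.Chars.join [] (PySem.Chars.splitOn kv.1.toList "__".toList).dropLast) == executor_name))).map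
        (fun kv => (String.ofList ((PySem.Chars.splitOn kv.1.toList "__".toList).getLastD []), kv.2)))
  -- result = {**common, **overrides}
  let result := common.update overrides.items
  -- specific = parameters.get(executor_name, None); if specific: result.update(**specific)
  -- (true branch excluded by Pre_, exactly as in port A)
  match d.get? executor_name with
  | none => result.items
  | some sp => if sp.isEmpty then result.items else result.items

-- ===== PRECONDITION & SPEC =====

-- Pre_ excludes inputs whose entry for executor_name is a non-empty dict: there A (and B) run
-- result.update(**specific), which stores Int values in the result — no value of the declared
-- List (String × Int) value type, hence unrepresentable under the type convention.
def Pre_parse_specific_params_py (parameters : List (String × List (String × Int))) (executor_name : String) : Prop :=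
  ∀ p ∈ parameters, p.1 = executor_name → p.2 = []

instance (parameters : List (String × List (String × Int))) (executor_name : String) : Decidable (Pre_parse_specific_params_py parameters executor_name) := by unfold Pre_parse_specific_params_py; infer_instance

def pvWitness_parse_specific_params_py : (List (String × List (String × Int))) × String :=
  ([("a", [("p", 1)]), ("b__e", [("q", 2)])], "e")

def Spec_parse_specific_params_py (parameters : List (String × List (String × Int))) (executor_name : String) (out : List (String × List (String × Int))) : Prop := out = parse_specific_params_py_alt parameters executor_name
instance (parameters : List (String × List (String × Int))) (executor_name : String) (out : List (String × List (String × Int))) : Decidable (Spec_parse_specific_params_py parameters executor_name out) := by unfold Spec_parse_specific_params_py; infer_instance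

-- ===== CLAIM (what is proved, stated in full; the proofs are below) =====
def Claim_equal_parse_specific_params_py : Prop := ∀ (parameters : List (String × List (String × Int))) (executor_name : String), Dom_parse_specific_params_py parameters executor_name → Pre_parse_specific_params_py parameters executor_name → Spec_parse_specific_params_py parameters executor_name (parse_specific_params_py parameters executor_name)

-- ===== LEMMAS AND PROOFS =====

-- -------- string side: the last piece of key.split('__') never contains '__' --------

theorem pv_go_ne_nil (sep : List Char) : ∀ (fuel : Nat) (l cur : List Char) (acc : List (List Char)),
    PySem.Chars.splitOn.go sep fuel l cur acc ≠ [] := by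
  intro fuel
  induction fuel with
  | zero => intro l cur acc; unfold PySem.Chars.splitOn.go; simp
  | succ n ih =>
    intro l cur acc
    cases l with
    | nil => unfold PySem.Chars.splitOn.go; simp
    | cons c rest =>
      unfold PySem.Chars.splitOn.go
      by_cases h : sep.isPrefixOf (c :: rest) = true
      · simp only [h, if_true]; exact ih _ _ _
      · simp only [h]; exact ih _ _ _

theorem pv_splitOn_ne_nil (s sep : List Char) : PySem.Chars.splitOn s sep ≠ [] := by
  unfold PySem.Chars.splitOn; exact pv_go_ne_nil _ _ _ _ _

-- a scanned segment in which no occurrence of sep starts contains no occurrence of sep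
theorem pv_notIn_of_inv (sep l cs : List Char) (hsep : sep ≠ [])
    (hinv : ∀ y, y ≠ [] → y <:+ cs → sep.isPrefixOf (y ++ l) = false) :
    PySem.Chars.isIn sep cs = false := by
  rw [PySem.Chars.isIn_eq_false_iff]
  rintro ⟨u, w, huw⟩
  have hy : (sep ++ w) <:+ cs := ⟨u, by rw [← List.append_assoc]; exact huw⟩
  have hfalse := hinv (sep ++ w) (by simp [hsep]) hy
  have htrue : sep.isPrefixOf ((sep ++ w) ++ l) = true := by
    rw [List.isPrefixOf_iff_prefix, List.append_assoc]
    exact List.prefix_append _ _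
  rw [hfalse] at htrue
  exact Bool.noConfusion htrue

theorem pv_suffix_concat_decomp {y xs : List Char} {c : Char} (hy : y ≠ []) (h : y <:+ xs ++ [c]) :
    ∃ y', y = y' ++ [c] ∧ y' <:+ xs := by
  obtain ⟨t, ht⟩ := h
  have hy2 : y.dropLast ++ [y.getLast hy] = y := List.dropLast_append_getLast hy
  rw [← hy2, ← List.append_assoc, ← List.concat_eq_append, ← List.concat_eq_append] at ht
  obtain ⟨ht1, ht2⟩ := List.concat_inj.mp ht
  rw [ht2] at hy2
  exact ⟨y.dropLast, hy2.symm, ⟨t, ht1⟩⟩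

theorem pv_go_pieces (sep : List Char) (hsep : sep ≠ []) :
    ∀ (fuel : Nat) (l cur : List Char) (acc : List (List Char)),
    l.length < fuel →
    (∀ y, y ≠ [] → y <:+ cur.reverse → sep.isPrefixOf (y ++ l) = false) →
    (∀ p ∈ acc, PySem.Chars.isIn sep p = false) →
    ∀ p ∈ PySem.Chars.splitOn.go sep fuel l cur acc, PySem.Chars.isIn sep p = false := by
  intro fuel
  induction fuel with
  | zero => intro l cur acc hl; omega
  | succ n ih =>
    intro l cur acc hl hcur hacc
    cases l with
    | nil =>
      unfold PySem.Chars.splitOn.go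
      intro p hp
      simp only [List.mem_reverse, List.mem_cons] at hp
      rcases hp with rfl | hp
      · exact pv_notIn_of_inv sep [] _ hsep hcur
      · exact hacc _ hp
    | cons c rest =>
      unfold PySem.Chars.splitOn.go
      by_cases h : sep.isPrefixOf (c :: rest) = true
      · simp only [h, if_true]
        apply ih
        · have hsl : 1 ≤ sep.length := by
            cases sep with | nil => exact absurd rfl hsep | cons a b => simp
          simp only [List.length_drop, List.length_cons] at hl ⊢
          omega
        · intro y hy hsuff
          simp only [List.reverse_nil] at hsuff
          exact absurd (List.suffix_nil.mp hsuff) hy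
        · intro p hp
          rcases List.mem_cons.mp hp with rfl | hp
          · exact pv_notIn_of_inv sep (c :: rest) _ hsep hcur
          · exact hacc _ hp
      · simp only [h]
        apply ih
        · simp only [List.length_cons] at hl; omega
        · intro y hy hsuff
          simp only [List.reverse_cons] at hsuff
          obtain ⟨y', rfl, hy'⟩ := pv_suffix_concat_decomp hy hsuff
          rcases eq_or_ne y' [] with rfl | hne
          · simp only [List.nil_append, List.singleton_append]
            exact Bool.eq_false_iff.mpr h
          · have := hcur y' hne hy'
            simpa [List.append_assoc] using this
        · exact hacc

theorem pv_splitOn_pieces (s sep : List Char) (hsep : sep ≠ []) :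
    ∀ p ∈ PySem.Chars.splitOn s sep, PySem.Chars.isIn sep p = false := by
  unfold PySem.Chars.splitOn
  apply pv_go_pieces sep hsep
  · omega
  · intro y hy hsuff
    simp only [List.reverse_nil] at hsuff
    exact absurd (List.suffix_nil.mp hsuff) hy
  · intro p hp; simp at hp

theorem pv_lastPiece_notIn (s sep : List Char) (hsep : sep ≠ []) :
    PySem.Chars.isIn sep ((PySem.Chars.splitOn s sep).getLastD []) = false := by
  have hne := pv_splitOn_ne_nil s sep
  rw [List.getLastD_eq_getLast?, List.getLast?_eq_some_getLast hne, Option.getD_some]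
  exact pv_splitOn_pieces s sep hsep _ (List.getLast_mem hne)

-- -------- proof-side abbreviations --------

def pvNew (k : String) : String :=
  String.ofList ((PySem.Chars.splitOn k.toList "__".toList).getLastD [])

def pvExec (k : String) : String :=
  String.ofList (PySem.Chars.join [] (PySem.Chars.splitOn k.toList "__".toList).dropLast)

def pvStepA (e : String) (r : PySem.Dict String (List (String × Int))) (kv : String × List (String × Int)) : PySem.Dict String (List (String × Int)) :=
  if pvIsSpecificB kv.1 then
    (if pvExec kv.1 = e then r.insert (pvNew kv.1) kv.2 else r).erase kv.1
  else r

def pvStepB (e : String) (r : PySem.Dict String (List (String × Int))) (kv : String × List (String × Int)) : PySem.Dict String (List (String × Int)) :=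
  if pvIsSpecificB kv.1 then
    (if pvExec kv.1 = e then r.insert (pvNew kv.1) kv.2 else r)
  else r

def pvIns (r : PySem.Dict String (List (String × Int))) (nv : String × List (String × Int)) : PySem.Dict String (List (String × Int)) :=
  r.insert nv.1 nv.2

def pvEraseSpecs (R : PySem.Dict String (List (String × Int))) (S : List (String × List (String × Int))) : PySem.Dict String (List (String × Int)) :=
  S.foldl (fun r kv => if pvIsSpecificB kv.1 then r.erase kv.1 else r) R

theorem pv_specB_new_false (k : String) : pvIsSpecificB (pvNew k) = false := by
  have h := pv_lastPiece_notIn k.toList ['_', '_'] (by decide)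
  rw [List.getLastD_eq_getLast?] at h
  unfold pvIsSpecificB pvNew
  simp [PySem.Str.isIn_eq, h]

theorem pv_specA_eq_specB (k : String) : pvIsSpecificA k = pvIsSpecificB k := by
  unfold pvIsSpecificA pvIsSpecificB
  by_cases h1 : PySem.Str.isIn "__" k = true <;>
    by_cases h2 : PySem.Str.startswith k "__" = true <;>
      by_cases h3 : PySem.Str.endswith k "__" = true <;>
        simp_all

-- -------- dict side: insert of a non-specific key commutes with erasing specific keys --------

theorem pv_filter_map_comm {κ ν : Type} [BEq κ] [LawfulBEq κ] (L : List (κ × ν)) (n k : κ) (v : ν) (h : n ≠ k) :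
    (L.map (fun p => if p.1 == n then (n, v) else p)).filter (fun p => !(p.1 == k)) =
    (L.filter (fun p => !(p.1 == k))).map (fun p => if p.1 == n then (n, v) else p) := by
  induction L with
  | nil => rfl
  | cons p L ih =>
    simp only [List.map_cons, List.filter_cons]
    by_cases hp : p.1 = n
    · have h1 : (p.1 == n) = true := by simp [hp]
      have h2 : (!((n : κ) == k)) = true := by simp [h]
      have h3 : (!(p.1 == k)) = true := by simp [hp, h]
      simp [h1, h2, h3, ih]
    · have h1 : (p.1 == n) = false := by simp [hp]
      by_cases hk : p.1 = k
      · have h3 : (!(p.1 == k)) = false := by simp [hk]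
        simp [h1, h3, ih]
      · have h3 : (!(p.1 == k)) = true := by simp [hk]
        simp [h1, h3, ih]

theorem pv_contains_erase {κ ν : Type} [BEq κ] [LawfulBEq κ] (d : PySem.Dict κ ν) (k n : κ) (h : n ≠ k) :
    (d.erase k).contains n = d.contains n := by
  obtain ⟨L⟩ := d
  simp only [PySem.Dict.erase, PySem.Dict.contains]
  induction L with
  | nil => rfl
  | cons p L ih =>
    by_cases hpk : p.1 = k
    · have h1 : (!(p.1 == k)) = false := by simp [hpk]
      have h2 : (p.1 == n) = false := by rw [hpk]; exact beq_eq_false_iff_ne.mpr (Ne.symm h)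
      simp [List.any_cons, h1, h2, ih]
    · have h1 : (!(p.1 == k)) = true := by simp [hpk]
      simp [List.any_cons, h1, ih]

theorem pv_erase_insert_comm {κ ν : Type} [BEq κ] [LawfulBEq κ] (d : PySem.Dict κ ν) (n k : κ) (v : ν) (h : n ≠ k) :
    (d.insert n v).erase k = (d.erase k).insert n v := by
  have herase : ∀ (x : PySem.Dict κ ν), (x.erase k).items = x.items.filter (fun p => !(p.1 == k)) := fun _ => rfl
  apply PySem.Dict.ext
  by_cases hcn : d.contains n = true
  · have hcn' : (d.erase k).contains n = true := by rw [pv_contains_erase d k n h]; exact hcn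
    rw [herase, PySem.Dict.items_insert_of_contains _ _ hcn, PySem.Dict.items_insert_of_contains _ _ hcn', herase]
    exact pv_filter_map_comm d.items n k v h
  · have hf : d.contains n = false := Bool.eq_false_iff.mpr hcn
    have hcn' : (d.erase k).contains n = false := by rw [pv_contains_erase d k n h]; exact hf
    rw [herase, PySem.Dict.items_insert_of_not_contains _ _ hf, PySem.Dict.items_insert_of_not_contains _ _ hcn', herase]
    rw [List.filter_append]
    simp [h]

theorem pv_eraseSpecs_insert (S : List (String × List (String × Int))) :
    ∀ (R : PySem.Dict String (List (String × Int))) (n : String) (v : List (String × Int)),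
    pvIsSpecificB n = false →
    pvEraseSpecs (R.insert n v) S = (pvEraseSpecs R S).insert n v := by
  induction S with
  | nil => intro R n v _; rfl
  | cons kv S ih =>
    intro R n v hn
    rw [show pvEraseSpecs (R.insert n v) (kv :: S) = pvEraseSpecs (if pvIsSpecificB kv.1 then (R.insert n v).erase kv.1 else R.insert n v) S from rfl]
    rw [show pvEraseSpecs R (kv :: S) = pvEraseSpecs (if pvIsSpecificB kv.1 then R.erase kv.1 else R) S from rfl]
    by_cases hs : pvIsSpecificB kv.1 = true
    · have hne : n ≠ kv.1 := by intro hx; rw [← hx, hn] at hs; exact Bool.noConfusion hs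
      rw [if_pos hs, if_pos hs, pv_erase_insert_comm _ _ _ _ hne, ih _ _ _ hn]
    · rw [if_neg hs, if_neg hs, ih _ _ _ hn]

theorem pv_main (e : String) : ∀ (S : List (String × List (String × Int))) (R : PySem.Dict String (List (String × Int))),
    S.foldl (pvStepA e) R = S.foldl (pvStepB e) (pvEraseSpecs R S) := by
  intro S
  induction S with
  | nil => intro R; rfl
  | cons kv S ih =>
    intro R
    rw [List.foldl_cons, List.foldl_cons]
    rw [show pvEraseSpecs R (kv :: S) = pvEraseSpecs (if pvIsSpecificB kv.1 then R.erase kv.1 else R) S from rfl]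
    by_cases hs : pvIsSpecificB kv.1 = true
    · rw [if_pos hs]
      by_cases he : pvExec kv.1 = e
      · rw [show pvStepA e R kv = (R.insert (pvNew kv.1) kv.2).erase kv.1 from by unfold pvStepA; rw [if_pos hs, if_pos he]]
        rw [show pvStepB e (pvEraseSpecs (R.erase kv.1) S) kv = (pvEraseSpecs (R.erase kv.1) S).insert (pvNew kv.1) kv.2 from by unfold pvStepB; rw [if_pos hs, if_pos he]]
        rw [ih]
        congr 1
        have hne : pvNew kv.1 ≠ kv.1 := by
          intro hx; rw [← hx, pv_specB_new_false kv.1] at hs; exact Bool.noConfusion hs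
        rw [pv_erase_insert_comm _ _ _ _ hne,
            pv_eraseSpecs_insert S (R.erase kv.1) (pvNew kv.1) kv.2 (pv_specB_new_false kv.1)]
      · rw [show pvStepA e R kv = R.erase kv.1 from by unfold pvStepA; rw [if_pos hs, if_neg he]]
        rw [show pvStepB e (pvEraseSpecs (R.erase kv.1) S) kv = pvEraseSpecs (R.erase kv.1) S from by unfold pvStepB; rw [if_pos hs, if_neg he]]
        exact ih _
    · rw [if_neg hs]
      rw [show pvStepA e R kv = R from by unfold pvStepA; rw [if_neg hs]]
      rw [show pvStepB e (pvEraseSpecs R S) kv = pvEraseSpecs R S from by unfold pvStepB; rw [if_neg hs]]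
      exact ih _

-- -------- B's `common` comprehension builds exactly the specific-keys-erased dict --------

theorem pv_eraseSpecs_items (S : List (String × List (String × Int))) :
    ∀ (R : PySem.Dict String (List (String × Int))),
    (pvEraseSpecs R S).items =
      R.items.filter (fun p => !(S.any (fun q => pvIsSpecificB q.1 && (p.1 == q.1)))) := by
  induction S with
  | nil => intro R; simp [pvEraseSpecs]
  | cons q S ih =>
    intro R
    rw [show pvEraseSpecs R (q :: S) = pvEraseSpecs (if pvIsSpecificB q.1 then R.erase q.1 else R) S from rfl]
    by_cases hs : pvIsSpecificB q.1 = true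
    · rw [if_pos hs, ih]
      rw [show (R.erase q.1).items = R.items.filter (fun p => !(p.1 == q.1)) from rfl]
      rw [List.filter_filter]
      apply List.filter_congr
      intro p _
      by_cases hpq : p.1 = q.1
      · simp [List.any_cons, hpq, hs]
      · simp [List.any_cons, hs, Bool.and_comm]
    · rw [if_neg hs, ih]
      apply List.filter_congr
      intro p _
      have hs' : pvIsSpecificB q.1 = false := Bool.eq_false_iff.mpr hs
      simp [List.any_cons, hs']

theorem pv_common_eq (parameters : List (String × List (String × Int))) :
    (PySem.Dict.ofList ((PySem.Dict.ofList parameters).items.filter (fun kv => !pvIsSpecificB kv.1))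
        : PySem.Dict String (List (String × Int)))
      = pvEraseSpecs (PySem.Dict.ofList parameters) (PySem.Dict.ofList parameters).items := by
  have hnd' : ((PySem.Dict.ofList parameters : PySem.Dict String (List (String × Int))).items.map Prod.fst).Nodup :=
    PySem.Dict.nodup_keys_ofList parameters
  apply PySem.Dict.ext
  rw [pv_eraseSpecs_items]
  rw [show (PySem.Dict.ofList ((PySem.Dict.ofList parameters).items.filter (fun kv => !pvIsSpecificB kv.1))
        : PySem.Dict String (List (String × Int)))
      = ((PySem.Dict.ofList parameters).items.filter (fun kv => !pvIsSpecificB kv.1)).foldl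
          (fun r (kv : String × List (String × Int)) => r.insert kv.1 kv.2) PySem.Dict.empty from rfl]
  rw [PySem.Dict.items_foldl_insert_fresh ((PySem.Dict.ofList parameters).items.filter (fun kv => !pvIsSpecificB kv.1))
      Prod.fst Prod.snd PySem.Dict.empty (fun a _ => rfl)
      (List.Nodup.sublist (List.Sublist.map Prod.fst List.filter_sublist) hnd')]
  rw [show (PySem.Dict.empty : PySem.Dict String (List (String × Int))).items = [] from rfl, List.nil_append]
  rw [show (List.map (fun (a : String × List (String × Int)) => (a.1, a.2)) ((PySem.Dict.ofList parameters).items.filter (fun kv => !pvIsSpecificB kv.1))) = (PySem.Dict.ofList parameters).items.filter (fun kv => !pvIsSpecificB kv.1) from by simp]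
  apply List.filter_congr
  intro p hp
  by_cases hs : pvIsSpecificB p.1 = true
  · have hany : ((PySem.Dict.ofList parameters).items.any (fun q => pvIsSpecificB q.1 && (p.1 == q.1))) = true :=
      List.any_eq_true.mpr ⟨p, hp, by simp [hs]⟩
    simp [hs, hany]
  · have hf : pvIsSpecificB p.1 = false := Bool.eq_false_iff.mpr hs
    have hany : ((PySem.Dict.ofList parameters).items.any (fun q => pvIsSpecificB q.1 && (p.1 == q.1))) = false := by
      rw [Bool.eq_false_iff]
      intro hx
      obtain ⟨q, hq, hqq⟩ := List.any_eq_true.mp hx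
      obtain ⟨hq1, hq2⟩ := Bool.and_eq_true_iff.mp hqq
      rw [show p.1 = q.1 from by simpa using hq2] at hf
      rw [hf] at hq1
      exact Bool.noConfusion hq1
    simp [hf, hany]

-- -------- merging the deduplicated override index = folding the raw override pairs --------

theorem pv_insert_insert_comm_of_contains (d : PySem.Dict String (List (String × Int)))
    (j k : String) (u v : List (String × Int)) (hk : d.contains k = true) (hjk : j ≠ k) :
    (d.insert j u).insert k v = (d.insert k v).insert j u := by
  have hk' : ((d.insert j u)).contains k = true := by
    rw [PySem.Dict.contains_insert]
    simp [hk]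
  by_cases hj : d.contains j = true
  · have hj' : ((d.insert k v)).contains j = true := by
      rw [PySem.Dict.contains_insert]
      simp [hj]
    apply PySem.Dict.ext
    rw [PySem.Dict.items_insert_of_contains _ _ hk', PySem.Dict.items_insert_of_contains _ _ hj,
        PySem.Dict.items_insert_of_contains _ _ hj', PySem.Dict.items_insert_of_contains _ _ hk,
        List.map_map, List.map_map]
    apply List.map_congr_left
    intro p _
    by_cases h1 : p.1 = j
    · have hb1 : (p.1 == j) = true := by simp [h1]
      have hb2 : (p.1 == k) = false := by simp [h1, hjk]
      simp [Function.comp, hb1, hb2, hjk]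
    · by_cases h2 : p.1 = k
      · have hb1 : (p.1 == j) = false := by simp [h1]
        have hb2 : (p.1 == k) = true := by simp [h2]
        simp [Function.comp, hb1, hb2, Ne.symm hjk]
      · have hb1 : (p.1 == j) = false := by simp [h1]
        have hb2 : (p.1 == k) = false := by simp [h2]
        simp [Function.comp, hb1, hb2]
  · have hjf : d.contains j = false := Bool.eq_false_iff.mpr hj
    have hj' : ((d.insert k v)).contains j = false := by
      rw [PySem.Dict.contains_insert]
      simp [hjf, hjk]
    apply PySem.Dict.ext
    rw [PySem.Dict.items_insert_of_contains _ _ hk', PySem.Dict.items_insert_of_not_contains _ _ hjf,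
        PySem.Dict.items_insert_of_not_contains _ _ hj', PySem.Dict.items_insert_of_contains _ _ hk,
        List.map_append]
    have : (List.map (fun p => if p.1 == k then (k, v) else p) [(j, u)]) = [(j, u)] := by
      simp [hjk]
    rw [this]

theorem pv_foldl_insert_out (k : String) (v : List (String × Int)) :
    ∀ (P : List (String × List (String × Int))) (d : PySem.Dict String (List (String × Int))),
    d.contains k = true → k ∉ P.map Prod.fst →
    (P.foldl pvIns d).insert k v = P.foldl pvIns (d.insert k v) := by
  intro P
  induction P with
  | nil => intro d _ _; rfl
  | cons p P ih =>
    intro d hk hmem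
    have hpk : p.1 ≠ k := by
      intro hx; exact hmem (by rw [List.map_cons, hx]; exact List.mem_cons_self)
    have hmem' : k ∉ P.map Prod.fst := fun hx => hmem (by rw [List.map_cons]; exact List.mem_cons_of_mem _ hx)
    rw [List.foldl_cons, List.foldl_cons]
    rw [show pvIns d p = d.insert p.1 p.2 from rfl, show pvIns (d.insert k v) p = (d.insert k v).insert p.1 p.2 from rfl]
    have hk' : (d.insert p.1 p.2).contains k = true := by
      rw [PySem.Dict.contains_insert]
      simp [hk]
    rw [ih _ hk' hmem', pv_insert_insert_comm_of_contains d p.1 k p.2 v hk hpk]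

theorem pv_foldl_insert_replace (k : String) (v : List (String × Int)) :
    ∀ (P : List (String × List (String × Int))) (c : PySem.Dict String (List (String × Int))),
    (P.map Prod.fst).Nodup → k ∈ P.map Prod.fst →
    (P.map (fun p => if p.1 == k then (k, v) else p)).foldl pvIns c = (P.foldl pvIns c).insert k v := by
  intro P
  induction P with
  | nil => intro c _ hmem; simp at hmem
  | cons p P ih =>
    intro c hnd hmem
    rw [List.map_cons] at hnd
    have hnd' : (P.map Prod.fst).Nodup := hnd.of_cons
    by_cases hp : p.1 = k
    · have hb : (p.1 == k) = true := by simp [hp]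
      have hknotP : k ∉ P.map Prod.fst := by
        rw [← hp]; exact (List.nodup_cons.mp hnd).1
      have hfix : P.map (fun q => if q.1 == k then (k, v) else q) = P := by
        apply List.map_congr_left ?_ |>.trans (List.map_id P)
        intro q hq
        have : q.1 ≠ k := by
          intro hx
          exact hknotP (by rw [← hx]; exact List.mem_map_of_mem hq)
        simp [this]
      rw [List.map_cons, hfix]
      simp only [hb, if_true]
      rw [List.foldl_cons, List.foldl_cons]
      rw [show pvIns c (k, v) = c.insert k v from rfl, show pvIns c p = c.insert p.1 p.2 from rfl, hp]
      have hout : (P.foldl pvIns (c.insert k p.2)).insert k v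
          = P.foldl pvIns ((c.insert k p.2).insert k v) :=
        pv_foldl_insert_out k v P (c.insert k p.2) (PySem.Dict.contains_insert_self _ _ _) hknotP
      rw [hout, PySem.Dict.insert_insert_self]
    · have hb : (p.1 == k) = false := by simp [hp]
      have hmem' : k ∈ P.map Prod.fst := by
        rcases List.mem_cons.mp hmem with h | h
        · exact absurd h.symm hp
        · exact h
      rw [List.map_cons]
      simp only [hb]
      rw [List.foldl_cons, List.foldl_cons]
      exact ih _ hnd' hmem'

theorem pv_update_ofList (L : List (String × List (String × Int))) (c : PySem.Dict String (List (String × Int))) :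
    ((PySem.Dict.ofList L : PySem.Dict String (List (String × Int))).items).foldl pvIns c = L.foldl pvIns c := by
  induction L using List.reverseRecOn with
  | nil => rfl
  | append_singleton L x ih =>
    have hsplit : (PySem.Dict.ofList (L ++ [x]) : PySem.Dict String (List (String × Int)))
        = (PySem.Dict.ofList L).insert x.1 x.2 := by
      rw [show (PySem.Dict.ofList (L ++ [x]) : PySem.Dict String (List (String × Int)))
          = (L ++ [x]).foldl pvIns PySem.Dict.empty from rfl, List.foldl_append]
      rfl
    rw [hsplit, List.foldl_append]
    by_cases hc : (PySem.Dict.ofList L : PySem.Dict String (List (String × Int))).contains x.1 = true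
    · rw [PySem.Dict.items_insert_of_contains _ _ hc]
      have hmem : x.1 ∈ (PySem.Dict.ofList L : PySem.Dict String (List (String × Int))).items.map Prod.fst :=
        (PySem.Dict.contains_iff_mem_keys _ _).mp hc
      rw [pv_foldl_insert_replace x.1 x.2 _ c (PySem.Dict.nodup_keys_ofList L) hmem, ih]
      rfl
    · have hcf : (PySem.Dict.ofList L : PySem.Dict String (List (String × Int))).contains x.1 = false :=
        Bool.eq_false_iff.mpr hc
      rw [PySem.Dict.items_insert_of_not_contains _ _ hcf, List.foldl_append, ih]

-- -------- assembling the two ports --------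

theorem pv_ports_eq (parameters : List (String × List (String × Int))) (executor_name : String) :
    parse_specific_params_py parameters executor_name = parse_specific_params_py_alt parameters executor_name := by
  simp only [parse_specific_params_py, parse_specific_params_py_alt]
  have hnd : (PySem.Dict.ofList parameters : PySem.Dict String (List (String × Int))).keys.Nodup :=
    PySem.Dict.nodup_keys_ofList parameters
  -- A's loop over keys is the pvStepA fold over the items
  have hA : ((PySem.Dict.ofList parameters : PySem.Dict String (List (String × Int))).keys.foldl
      (fun parsed key => if pvIsSpecificA key then
        ((if (pvSplitKeyAndExecutorName key).2 = executor_name then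
            parsed.insert (pvSplitKeyAndExecutorName key).1 ((PySem.Dict.ofList parameters).getD key [])
          else parsed).erase key)
      else parsed)
      (PySem.Dict.ofList parameters))
      = (PySem.Dict.ofList parameters).items.foldl (pvStepA executor_name) (PySem.Dict.ofList parameters) := by
    rw [show (PySem.Dict.ofList parameters : PySem.Dict String (List (String × Int))).keys
        = (PySem.Dict.ofList parameters).items.map (fun x => x.fst) from rfl]
    rw [List.foldl_map]
    apply PySem.List.foldl_congr_mem
    intro acc kv hkv
    have hkv' : (kv.1, kv.2) ∈ (PySem.Dict.ofList parameters).items := by rw [Prod.mk.eta]; exact hkv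
    have hval := PySem.Dict.getD_of_mem_items (PySem.Dict.ofList parameters) hkv' hnd []
    have hsp1 : ∀ s, (pvSplitKeyAndExecutorName s).1 = pvNew s := fun s => rfl
    have hsp2 : ∀ s, (pvSplitKeyAndExecutorName s).2 = pvExec s := fun s => rfl
    simp only [pvStepA, pv_specA_eq_specB, hsp1, hsp2, hval]
  rw [hA, pv_main executor_name]
  -- B's merge of the override index is the pvStepB fold
  have hB : ∀ (c : PySem.Dict String (List (String × Int))),
      c.update (PySem.Dict.ofList
        (((PySem.Dict.ofList parameters : PySem.Dict String (List (String × Int))).items.filter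
            (fun kv => pvIsSpecificB kv.1 &&
              (String.ofList (PySem.Chars.join [] (PySem.Chars.splitOn kv.1.toList "__".toList).dropLast) == executor_name))).map
          (fun kv => (String.ofList ((PySem.Chars.splitOn kv.1.toList "__".toList).getLastD []), kv.2)))
        : PySem.Dict String (List (String × Int))).items
      = (PySem.Dict.ofList parameters).items.foldl (pvStepB executor_name) c := by
    intro c
    rw [show ∀ (L : List (String × List (String × Int))), c.update L = L.foldl pvIns c from fun _ => rfl]
    rw [pv_update_ofList, List.foldl_map, List.foldl_filter]
    apply PySem.List.foldl_congr_mem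
    intro r kv _
    show (if pvIsSpecificB kv.1 && (pvExec kv.1 == executor_name) then r.insert (pvNew kv.1) kv.2 else r)
        = pvStepB executor_name r kv
    unfold pvStepB
    by_cases h1 : pvIsSpecificB kv.1 = true <;> by_cases h2 : pvExec kv.1 = executor_name <;>
      simp [h1, h2]
  rw [← hB, pv_common_eq]

-- ===== VERDICT (by name: the statement is the Claim_ definition above) =====
theorem parse_specific_params_py_spec : Claim_equal_parse_specific_params_py := by
  intro parameters executor_name _ _
  unfold Spec_parse_specific_params_py
  exact pv_ports_eq parameters executor_name
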